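-- pv_equiv track=rewrite | github.com/Luc656/DNA-Challenge | Lucs_code.py | spot_homopolymer_runs
-- ===== SOURCE A (Python) =====
-- def spot_homopolymer_runs(sequence, min_run_length=3):
--
--     i = 0
--     runs = []
--     length = len(sequence)
--
--     while i < length:
--         j = i
--         while j < length and sequence[i] == sequence[j]:
--             j += 1
--         if j - i >= min_run_length:
--             for idx in range(i, j):
--                 runs.append(idx)
--         i = j
--
--     return runs
-- ===== SOURCE B (Python) =====
-- def spot_homopolymer_runs(sequence, min_run_length=3):
--     # staged: (1) collect all run-boundary positions, (2) pair consecutive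
--     # boundaries into runs, (3) emit index ranges of runs meeting the threshold
--     n = len(sequence)
--     bounds = [i for i in range(n) if i == 0 or sequence[i] != sequence[i - 1]] + [n]
--     return [idx
--             for a, b in zip(bounds, bounds[1:])
--             if b - a >= min_run_length
--             for idx in range(a, b)]
-- ===== Notes on version B (the rewrite author's own statement) =====
-- stated objective: alternative
-- what changed: Replaced A's nested while-loops (an inner scan finding each run's end plus an emission loop) by a staged approach: one comprehension collects all run-boundary positions, consecutive boundaries are zipped into (start,end) pairs, and a second comprehension emits the index ranges of runs meeting the threshold.
import Mathlib
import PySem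

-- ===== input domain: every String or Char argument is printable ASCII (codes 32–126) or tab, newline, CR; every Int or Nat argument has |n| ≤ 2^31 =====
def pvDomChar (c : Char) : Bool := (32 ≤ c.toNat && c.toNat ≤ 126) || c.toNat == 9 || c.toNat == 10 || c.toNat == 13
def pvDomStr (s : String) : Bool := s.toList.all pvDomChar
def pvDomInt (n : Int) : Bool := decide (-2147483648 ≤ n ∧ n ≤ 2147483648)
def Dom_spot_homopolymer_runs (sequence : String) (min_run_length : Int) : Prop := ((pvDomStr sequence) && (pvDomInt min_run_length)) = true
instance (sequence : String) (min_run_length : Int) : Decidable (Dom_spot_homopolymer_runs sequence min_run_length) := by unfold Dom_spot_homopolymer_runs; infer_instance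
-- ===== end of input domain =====

-- B replaces A's nested while-loops by a staged boundary-list construction: collect all
-- run boundaries, pair consecutive ones, emit the qualifying index ranges (same O(n) cost).

-- ===== PORT A =====
-- inner while loop: 'j = i; while j < length and sequence[i] == sequence[j]: j += 1'
def pvAScan (cs : List Char) (c : Char) (j : Nat) : Nat :=
  if h : j < cs.length then
    if cs[j] = c then pvAScan cs c (j + 1) else j
  else j
termination_by cs.length - j

theorem pvAScan_ge (cs : List Char) (c : Char) (j : Nat) : j ≤ pvAScan cs c j := by
  unfold pvAScan
  split
  · split
    · have := pvAScan_ge cs c (j + 1); omega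
    · exact le_refl j
  · exact le_refl j
termination_by cs.length - j

theorem pvAScan_gt (cs : List Char) (j : Nat) (h : j < cs.length) :
    j < pvAScan cs (cs[j]) j := by
  have : pvAScan cs (cs[j]) j = pvAScan cs (cs[j]) (j + 1) := by
    conv_lhs => rw [pvAScan]
    simp [h]
  have := pvAScan_ge cs (cs[j]) (j + 1); omega

-- outer while loop over i, accumulating runs
def pvALoop (cs : List Char) (m : Int) (i : Nat) (runs : List Int) : List Int :=
  if h : i < cs.length then
    let j := pvAScan cs (cs[i]) i
    pvALoop cs m j
      (if m ≤ (j : Int) - (i : Int) then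
        runs ++ (List.range' i (j - i)).map Int.ofNat else runs)
  else runs
termination_by cs.length - i
decreasing_by
  have := pvAScan_gt cs i h
  omega

def spot_homopolymer_runs (sequence : String) (min_run_length : Int) : List Int :=
  pvALoop sequence.toList min_run_length 0 []

-- ===== PORT B =====
-- Source B: bounds = [i for i in range(n) if i == 0 or sequence[i] != sequence[i-1]] + [n];
-- then a comprehension over zip(bounds, bounds[1:]) emitting range(a, b) when b - a >= m
def spot_homopolymer_runs_alt (sequence : String) (min_run_length : Int) : List Int :=
  let cs := sequence.toList
  let n := cs.length
  let bounds := ((List.range n).filter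
      (fun i => i == 0 || !(cs.getD i ' ' == cs.getD (i - 1) ' '))) ++ [n]
  (bounds.zip bounds.tail).flatMap (fun ab =>
    if min_run_length ≤ (ab.2 : Int) - (ab.1 : Int) then
      (List.range' ab.1 (ab.2 - ab.1)).map Int.ofNat
    else [])

-- ===== PRECONDITION & SPEC =====
def Spec_spot_homopolymer_runs (sequence : String) (min_run_length : Int) (out : List Int) : Prop := out = spot_homopolymer_runs_alt sequence min_run_length
instance (sequence : String) (min_run_length : Int) (out : List Int) : Decidable (Spec_spot_homopolymer_runs sequence min_run_length out) := by unfold Spec_spot_homopolymer_runs; infer_instance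

-- ===== CLAIM (what is proved, stated in full; the proofs are below) =====
def Claim_equal_spot_homopolymer_runs : Prop := ∀ (sequence : String) (min_run_length : Int), Dom_spot_homopolymer_runs sequence min_run_length → Spec_spot_homopolymer_runs sequence min_run_length (spot_homopolymer_runs sequence min_run_length)

-- ===== LEMMAS AND PROOFS =====

-- boundary predicate of Source B's first comprehension
def pvStart (cs : List Char) (p : Nat) : Bool :=
  p == 0 || !(cs.getD p ' ' == cs.getD (p - 1) ' ')

-- the boundary list from position i onwards (with the final sentinel n)
def pvBounds (cs : List Char) (i : Nat) : List Nat :=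
  ((List.range' i (cs.length - i)).filter (pvStart cs)) ++ [cs.length]

def pvEmit (m : Int) (ps : List (Nat × Nat)) : List Int :=
  ps.flatMap (fun ab =>
    if m ≤ (ab.2 : Int) - (ab.1 : Int) then
      (List.range' ab.1 (ab.2 - ab.1)).map Int.ofNat
    else [])

theorem pvAScan_le (cs : List Char) (c : Char) (j : Nat) (h : j ≤ cs.length) :
    pvAScan cs c j ≤ cs.length := by
  rw [pvAScan]
  split
  · split
    · exact pvAScan_le cs c (j + 1) (by omega)
    · exact h
  · exact h
termination_by cs.length - j

theorem pvAScan_run (cs : List Char) (c : Char) (j k : Nat) (h1 : j ≤ k)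
    (h2 : k < pvAScan cs c j) : cs.getD k ' ' = c := by
  rw [pvAScan] at h2
  split at h2
  · rename_i hj
    split at h2
    · rename_i hc
      rcases Nat.eq_or_lt_of_le h1 with rfl | hlt
      · simpa [List.getD_eq_getElem?_getD, List.getElem?_eq_getElem hj] using hc
      · exact pvAScan_run cs c (j + 1) k hlt h2
    · omega
  · omega
termination_by cs.length - j

theorem pvAScan_stop (cs : List Char) (c : Char) (j : Nat)
    (h : pvAScan cs c j < cs.length) : cs.getD (pvAScan cs c j) ' ' ≠ c := by
  by_cases hj : j < cs.length
  · by_cases hc : cs[j] = c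
    · have he : pvAScan cs c j = pvAScan cs c (j + 1) := by
        conv_lhs => rw [pvAScan]
        simp [hj, hc]
      rw [he] at h ⊢
      exact pvAScan_stop cs c (j + 1) h
    · have he : pvAScan cs c j = j := by
        conv_lhs => rw [pvAScan]
        simp [hj, hc]
      rw [he]
      simpa [List.getD_eq_getElem?_getD, List.getElem?_eq_getElem hj] using hc
  · have he : pvAScan cs c j = j := by
      conv_lhs => rw [pvAScan]
      simp [hj]
    rw [he] at h
    omega
termination_by cs.length - j

-- pvStart holds at the end j of a run (when j < n)
theorem pvStart_scan (cs : List Char) (i : Nat) (hi : i < cs.length)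
    (hj : pvAScan cs (cs[i]) i < cs.length) :
    pvStart cs (pvAScan cs (cs[i]) i) = true := by
  set j := pvAScan cs (cs[i]) i with hjdef
  have hgt : i < j := pvAScan_gt cs i hi
  have hne : cs.getD j ' ' ≠ cs[i] := pvAScan_stop cs (cs[i]) i hj
  have heq : cs.getD (j - 1) ' ' = cs[i] :=
    pvAScan_run cs (cs[i]) i (j - 1) (by omega) (by omega)
  unfold pvStart
  simp only [Bool.or_eq_true, beq_iff_eq, Bool.not_eq_true', beq_eq_false_iff_ne]
  exact Or.inr (by rw [heq]; exact hne)

-- the boundary list from a run start i decomposes as i :: (bounds from the run's end)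
theorem pvBounds_cons (cs : List Char) (i : Nat) (hi : i < cs.length)
    (hs : pvStart cs i = true) :
    pvBounds cs i = i :: pvBounds cs (pvAScan cs (cs[i]) i) := by
  set j := pvAScan cs (cs[i]) i with hjdef
  have hgt : i < j := pvAScan_gt cs i hi
  have hle : j ≤ cs.length := pvAScan_le cs (cs[i]) i (le_of_lt hi)
  have hdec : List.range' i (cs.length - i) =
      i :: (List.range' (i + 1) (j - (i + 1)) ++ List.range' j (cs.length - j)) := by
    have h1 := List.range'_append_1 (s := i + 1) (m := j - (i + 1)) (n := cs.length - j)
    calc List.range' i (cs.length - i)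
        = i :: List.range' (i + 1) (cs.length - i - 1) := by
          rw [← List.range'_succ]; congr 1; omega
      _ = i :: List.range' (i + 1) (j - (i + 1) + (cs.length - j)) := by
          congr 2; omega
      _ = i :: (List.range' (i + 1) (j - (i + 1)) ++
            List.range' (i + 1 + (j - (i + 1))) (cs.length - j)) := by rw [← h1]
      _ = i :: (List.range' (i + 1) (j - (i + 1)) ++ List.range' j (cs.length - j)) := by
          congr 3; omega
  have hmid : ∀ p ∈ List.range' (i + 1) (j - (i + 1)), pvStart cs p = false := by
    intro p hp
    rw [List.mem_range'] at hp
    obtain ⟨k, hk, rfl⟩ := hp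
    have hp2 : i + 1 + 1 * k < j := by omega
    have he1 : cs.getD (i + 1 + 1 * k) ' ' = cs[i] :=
      pvAScan_run cs (cs[i]) i _ (by omega) hp2
    have he2 : cs.getD (i + 1 + 1 * k - 1) ' ' = cs[i] :=
      pvAScan_run cs (cs[i]) i _ (by omega) (by omega)
    have he1' : cs[i + 1 + k]?.getD ' ' = cs[i] := by
      simpa [List.getD_eq_getElem?_getD, show i + 1 + 1 * k = i + 1 + k by ring] using he1
    have he2' : cs[i + k]?.getD ' ' = cs[i] := by
      simpa [List.getD_eq_getElem?_getD, show i + 1 + 1 * k - 1 = i + k by omega] using he2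
    unfold pvStart
    simp [List.getD_eq_getElem?_getD, he1', he2']
  unfold pvBounds
  rw [hdec]
  rw [List.filter_cons_of_pos hs, List.filter_append]
  rw [List.filter_eq_nil_iff.mpr (fun p hp => by simp [hmid p hp])]
  simp

-- bounds from a run start (or from n) always begins with that position
theorem pvBounds_head (cs : List Char) (j : Nat) (hle : j ≤ cs.length)
    (hs : j = cs.length ∨ pvStart cs j = true) :
    ∃ t, pvBounds cs j = j :: t := by
  rcases hs with rfl | hs
  · exact ⟨[], by unfold pvBounds; simp⟩
  · by_cases hj : j < cs.length
    · have hdec : List.range' j (cs.length - j) =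
          j :: List.range' (j + 1) (cs.length - j - 1) := by
        rw [← List.range'_succ]; congr 1; omega
      exact ⟨(List.range' (j + 1) (cs.length - j - 1)).filter (pvStart cs) ++ [cs.length],
        by unfold pvBounds; rw [hdec, List.filter_cons_of_pos hs]; simp⟩
    · have he : j = cs.length := by omega
      subst he
      exact ⟨[], by unfold pvBounds; simp⟩

-- main invariant: the A-loop from a run start i produces runs ++ emitted pairs of pvBounds i
theorem pvMain (cs : List Char) (m : Int) (i : Nat) (runs : List Int)
    (h : i ≤ cs.length) (hs : i = cs.length ∨ pvStart cs i = true) :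
    pvALoop cs m i runs =
      runs ++ pvEmit m ((pvBounds cs i).zip (pvBounds cs i).tail) := by
  by_cases hi : i < cs.length
  · have hsi : pvStart cs i = true := by
      rcases hs with he | hs
      · omega
      · exact hs
    set j := pvAScan cs (cs[i]) i with hjdef
    have hgt : i < j := pvAScan_gt cs i hi
    have hjle : j ≤ cs.length := pvAScan_le cs (cs[i]) i (le_of_lt hi)
    have hjs : j = cs.length ∨ pvStart cs j = true := by
      by_cases hj : j < cs.length
      · exact Or.inr (pvStart_scan cs i hi hj)
      · exact Or.inl (by omega)
    obtain ⟨t, ht⟩ := pvBounds_head cs j hjle hjs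
    have hb : pvBounds cs i = i :: pvBounds cs j := pvBounds_cons cs i hi hsi
    have hzip : (pvBounds cs i).zip (pvBounds cs i).tail =
        (i, j) :: ((pvBounds cs j).zip (pvBounds cs j).tail) := by
      rw [hb, ht]
      simp [List.zip]
    rw [pvALoop, dif_pos hi, ← hjdef]
    rw [pvMain cs m j _ hjle hjs]
    rw [hzip]
    unfold pvEmit
    rw [List.flatMap_cons]
    by_cases hm : m ≤ (j : Int) - (i : Int)
    · simp [hm, List.append_assoc]
    · simp [hm]
  · have he : i = cs.length := by omega
    rw [pvALoop, dif_neg hi]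
    subst he
    unfold pvBounds
    simp [pvEmit]
termination_by cs.length - i
decreasing_by omega

-- ===== VERDICT (by name: the statement is the Claim_ definition above) =====
theorem spot_homopolymer_runs_spec : Claim_equal_spot_homopolymer_runs := by
  intro sequence m _
  unfold Spec_spot_homopolymer_runs spot_homopolymer_runs spot_homopolymer_runs_alt
  have h0 : (0 : Nat) = sequence.toList.length ∨ pvStart sequence.toList 0 = true := by
    right; unfold pvStart; simp
  have := pvMain sequence.toList m 0 [] (Nat.zero_le _) h0
  rw [this]
  unfold pvBounds pvEmit pvStart
  simp [List.range_eq_range']
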